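-- pv_equiv track=rewrite | github.com/nicolegiron/CMPSC131_HW6 | hw6.py | isValidKey
-- ===== SOURCE A (Python) =====
-- def isValidKey(key):
--   """
--   Returns True if key is a string that has 26 characters and each of the letter
--   'a'/'A'-'z'/'Z' appeared once and only once in either lower case or upper case.
--   Returns False otherwise.
--   """
--   alphabet = "abcdefghijklmnopqrstuvwxyz"
--   if len(key)==26:
--     for i in key:
--       for i in alphabet:
--         if i not in key.lower():
--           return False
--     return True
--   else:
--     return False
-- ===== SOURCE B (Python) =====
-- def isValidKey(key):
--   if len(key) == 26:
--     return sorted(key.lower()) == list("abcdefghijklmnopqrstuvwxyz")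
--   else:
--     return False
-- ===== Notes on version B (the rewrite author's own statement) =====
-- stated objective: simpler
-- what changed: Replaces A's doubly nested membership loops (for each key char, scan every alphabet letter and test it against key.lower()) with a single sort of the lowercased key compared against the alphabet list.
import Mathlib
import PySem

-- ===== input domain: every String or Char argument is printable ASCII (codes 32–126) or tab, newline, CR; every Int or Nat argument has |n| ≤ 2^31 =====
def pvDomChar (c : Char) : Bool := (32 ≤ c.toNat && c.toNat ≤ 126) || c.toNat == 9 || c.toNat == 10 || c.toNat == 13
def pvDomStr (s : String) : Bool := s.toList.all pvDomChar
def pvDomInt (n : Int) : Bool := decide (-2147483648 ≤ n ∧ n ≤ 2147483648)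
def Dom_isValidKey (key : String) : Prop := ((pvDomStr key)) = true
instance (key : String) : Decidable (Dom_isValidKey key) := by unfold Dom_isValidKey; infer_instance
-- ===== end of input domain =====

-- B replaces A's nested per-letter membership scans with one sort of the lowered key
-- compared against the alphabet (objective: simpler).

-- ===== PORT A =====
def pvAlphabet : List Char := ['a', 'b', 'c', 'd', 'e', 'f', 'g', 'h', 'i', 'j', 'k', 'l', 'm', 'n', 'o', 'p', 'q', 'r', 's', 't', 'u', 'v', 'w', 'x', 'y', 'z']  -- list("abcdefghijklmnopqrstuvwxyz")

-- inner loop: 'for i in alphabet: if i not in key.lower(): return False'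
-- (char-in-string membership is list membership on the lowered code points)
def pvInnerA (low : List Char) : List Char → Bool
  | [] => true
  | a :: as => if low.contains a then pvInnerA low as else false

-- outer loop: 'for i in key: <inner loop>'; after both loops, 'return True'
def pvOuterA (low : List Char) : List Char → Bool
  | [] => true
  | _ :: rest => if pvInnerA low pvAlphabet then pvOuterA low rest else false

def isValidKey (key : String) : Bool :=
  if PySem.Str.len key == 26 then
    pvOuterA (PySem.Str.lower key).toList key.toList
  else
    false

-- ===== PORT B =====
def isValidKey_alt (key : String) : Bool :=
  if PySem.Str.len key == 26 then
    PySem.List.sorted (PySem.Str.lower key).toList (fun x => x) false == pvAlphabet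
  else
    false

-- ===== PRECONDITION & SPEC =====
def Spec_isValidKey (key : String) (out : Bool) : Prop := out = isValidKey_alt key
instance (key : String) (out : Bool) : Decidable (Spec_isValidKey key out) := by unfold Spec_isValidKey; infer_instance

-- ===== CLAIM (what is proved, stated in full; the proofs are below) =====
def Claim_equal_isValidKey : Prop := ∀ (key : String), Dom_isValidKey key → Spec_isValidKey key (isValidKey key)

-- ===== LEMMAS AND PROOFS =====
theorem pvInnerA_eq (low as : List Char) :
    pvInnerA low as = as.all (fun a => low.contains a) := by
  induction as with
  | nil => rfl
  | cons a as ih => cases hc : low.contains a <;> simp [pvInnerA, ih]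

theorem pvOuterA_eq (low l : List Char) (h : l ≠ []) :
    pvOuterA low l = pvInnerA low pvAlphabet := by
  induction l with
  | nil => exact absurd rfl h
  | cons c rest ih =>
      have hstep : pvOuterA low (c :: rest) =
          if pvInnerA low pvAlphabet then pvOuterA low rest else false := rfl
      rw [hstep]
      cases hi : pvInnerA low pvAlphabet
      · simp
      · rw [if_pos rfl]
        cases rest with
        | nil => rfl
        | cons d t => exact (ih (by simp)).trans hi

theorem pv_core (low : List Char) (hlen : low.length = 26) :
    (pvAlphabet.all (fun a => low.contains a)) =
      (PySem.List.sorted low (fun x => x) false == pvAlphabet) := by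
  have hnd : pvAlphabet.Nodup := by decide
  have hpl : pvAlphabet.Pairwise (· < ·) := by decide
  have halen : pvAlphabet.length = 26 := rfl
  rw [Bool.eq_iff_iff, List.all_eq_true, beq_iff_eq]
  constructor
  · intro hall
    have hsub : pvAlphabet ⊆ low := fun a ha => by simpa using hall a ha
    have hperm : pvAlphabet.Perm low :=
      List.Subperm.perm_of_length_le (hnd.subperm hsub) (by omega)
    exact PySem.List.sorted_eq_of_perm_of_pairwise_lt low pvAlphabet (fun x => x) hperm hpl
  · intro hs a ha
    have hperm : pvAlphabet.Perm low := hs ▸ (PySem.List.sorted_perm low (fun x => x) false)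
    simpa using hperm.subset ha

theorem isValidKey_spec' (key : String) : isValidKey key = isValidKey_alt key := by
  unfold isValidKey isValidKey_alt
  cases hc : (PySem.Str.len key == 26)
  · simp
  · rw [if_pos rfl, if_pos rfl]
    have hlen : key.toList.length = 26 := by
      simp [PySem.Str.len] at hc
      rw [String.length_toList]
      omega
    have hlow : (PySem.Str.lower key).toList.length = 26 := by
      simp [PySem.Str.toList_lower, PySem.Chars.lower, hlen]
    have hne : key.toList ≠ [] := by
      intro h; rw [h] at hlen; simp at hlen
    rw [pvOuterA_eq _ _ hne, pvInnerA_eq, pv_core _ hlow]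

-- ===== VERDICT (by name: the statement is the Claim_ definition above) =====
theorem isValidKey_spec : Claim_equal_isValidKey := by
  intro key _
  exact isValidKey_spec' key
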